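-- pv_equiv track=rewrite | github.com/Raphy17/DDBS | coordinator.py | distribute_partitions
-- ===== SOURCE A (Python) =====
-- def distribute_partitions(loads, w):
--     worker_loads = [0, ] * w
--     partition_to_worker = {}
--     parts = [(i, loads[i]) for i in range(len(loads))]
--     parts.sort(key=lambda x: x[1], reverse=True)
--
--     for p in parts:
--         worker = worker_loads.index(min(worker_loads))
--         worker_loads[worker] += p[1]
--         partition_to_worker[p[0]] = worker
--     return partition_to_worker
-- ===== SOURCE B (Python) =====
-- def distribute_partitions(loads, w):
--     # Greedy assignment keeping the worker pool as a list sorted by (load, index):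
--     # the head is always the least-loaded worker (lowest index on ties), so no
--     # min()+.index() scans are needed; the updated worker is re-inserted in order.
--     parts = sorted(((i, loads[i]) for i in range(len(loads))), key=lambda x: x[1], reverse=True)
--     workers = [(0, i) for i in range(w)]
--     partition_to_worker = {}
--     for pid, load in parts:
--         wload, widx = workers.pop(0)
--         partition_to_worker[pid] = widx
--         new = (wload + load, widx)
--         k = 0
--         while k < len(workers) and workers[k] < new:
--             k += 1
--         workers.insert(k, new)
--     return partition_to_worker
-- ===== Notes on version B (the rewrite author's own statement) =====
-- stated objective: alternative
-- what changed: Instead of rescanning the load array with min() and .index() on every step, B keeps the worker pool as a list kept sorted by (load, index), popping the head (least-loaded, lowest-index worker) and re-inserting the updated worker in order.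
import Mathlib
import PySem

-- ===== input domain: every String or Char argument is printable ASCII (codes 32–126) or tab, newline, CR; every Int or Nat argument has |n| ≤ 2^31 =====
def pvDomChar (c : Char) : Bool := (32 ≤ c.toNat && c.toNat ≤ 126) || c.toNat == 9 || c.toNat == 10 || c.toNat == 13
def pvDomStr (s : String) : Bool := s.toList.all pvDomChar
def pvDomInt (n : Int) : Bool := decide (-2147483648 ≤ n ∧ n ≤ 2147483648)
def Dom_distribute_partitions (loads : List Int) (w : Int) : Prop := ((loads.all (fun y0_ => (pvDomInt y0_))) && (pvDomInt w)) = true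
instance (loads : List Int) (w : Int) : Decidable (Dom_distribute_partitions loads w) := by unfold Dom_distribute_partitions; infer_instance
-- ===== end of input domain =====

-- B replaces A's per-step min()+.index() scans over the load array by a worker pool
-- kept sorted by (load, index): pop the head, re-insert the updated worker in order
-- (objective: alternative algorithmic structure, same asymptotic cost).

-- ===== PORT A =====
-- loop body of A's 'for p in parts' (state: (worker_loads, partition_to_worker))
def pvStepA (st : List Int × PySem.Dict Int Int) (p : Int × Int) : List Int × PySem.Dict Int Int :=
  let wl := st.1
  -- worker = worker_loads.index(min(worker_loads)); min of [] raises in Python (outside Pre_), .getD 0 is never the value used inside Pre_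
  let worker : Nat := (PySem.List.index? wl ((PySem.List.min? wl (fun x => x)).getD 0)).getD 0
  (wl.set worker (wl.getD worker 0 + p.2), st.2.insert p.1 (worker : Int))

def distribute_partitions (loads : List Int) (w : Int) : List (Int × Int) :=
  -- [0,]*w : a negative w gives [] in Python, exactly Int.toNat's clamp
  let worker_loads : List Int := List.replicate w.toNat 0
  let parts : List (Int × Int) :=
    (PySem.List.pyRange 0 (PySem.List.len loads) 1).map (fun i => (i, PySem.List.pyGetD loads i 0))
  let parts := PySem.List.sorted parts (fun x => x.2) true
  (parts.foldl pvStepA (worker_loads, PySem.Dict.empty)).2.items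

-- ===== PORT B =====
-- Python's tuple '<' on pairs of ints is exactly this lexicographic test
def pvLexLt (a b : Int × Int) : Bool := a.1 < b.1 || (a.1 == b.1 && a.2 < b.2)

-- B's 'k = 0; while k < len(workers) and workers[k] < new: k += 1' (tail-recursive)
def pvFindPos (x : Int × Int) : List (Int × Int) → Nat → Nat
  | [], k => k
  | y :: ys, k => if pvLexLt y x then pvFindPos x ys (k + 1) else k

-- loop body of B's 'for pid, load in parts' (state: (workers, partition_to_worker))
def pvStepB (st : List (Int × Int) × PySem.Dict Int Int) (p : Int × Int) : List (Int × Int) × PySem.Dict Int Int :=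
  match st.1 with
  | [] => st  -- Python: workers.pop(0) raises IndexError here (outside Pre_)
  | (wload, widx) :: rest =>
    let nw := (wload + p.2, widx)
    -- workers.insert(k, new) with the k the while loop found
    (PySem.List.insert rest ((pvFindPos nw rest 0 : Nat) : Int) nw, st.2.insert p.1 widx)

def distribute_partitions_alt (loads : List Int) (w : Int) : List (Int × Int) :=
  let parts : List (Int × Int) :=
    PySem.List.sorted ((PySem.List.pyRange 0 (PySem.List.len loads) 1).map
      (fun i => (i, PySem.List.pyGetD loads i 0))) (fun x => x.2) true
  let workers : List (Int × Int) := (List.range w.toNat).map (fun (i : Nat) => ((0 : Int), (i : Int)))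
  (parts.foldl pvStepB (workers, PySem.Dict.empty)).2.items

-- ===== PRECONDITION & SPEC =====
-- Pre_ excludes only the inputs where A raises: w ≤ 0 with a nonempty loads list makes
-- A's min() of the empty worker list raise ValueError (B's pop(0) raises there too).
def Pre_distribute_partitions (loads : List Int) (w : Int) : Prop := loads = [] ∨ 1 ≤ w
instance (loads : List Int) (w : Int) : Decidable (Pre_distribute_partitions loads w) := by
  unfold Pre_distribute_partitions; infer_instance

def pvWitness_distribute_partitions : List Int × Int := ([5, 1, 3, 3], 2)

def Spec_distribute_partitions (loads : List Int) (w : Int) (out : List (Int × Int)) : Prop := out = distribute_partitions_alt loads w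
instance (loads : List Int) (w : Int) (out : List (Int × Int)) : Decidable (Spec_distribute_partitions loads w out) := by unfold Spec_distribute_partitions; infer_instance

-- ===== CLAIM (what is proved, stated in full; the proofs are below) =====
def Claim_equal_distribute_partitions : Prop := ∀ (loads : List Int) (w : Int), Dom_distribute_partitions loads w → Pre_distribute_partitions loads w → Spec_distribute_partitions loads w (distribute_partitions loads w)

-- ===== LEMMAS AND PROOFS =====

-- (load, index) view of A's worker_loads list; B's pool is a sorted permutation of it
def pvPool (wl : List Int) : List (Int × Int) :=
  (PySem.List.enumerate wl 0).map (fun p => (p.2, p.1))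

-- lexicographic ≤ on (load, index), the order B's pool is sorted by
def pvLexLe (a b : Int × Int) : Prop := a.1 < b.1 ∨ (a.1 = b.1 ∧ a.2 ≤ b.2)

theorem pvLexLt_false_iff (a b : Int × Int) : pvLexLt a b = false ↔ pvLexLe b a := by
  unfold pvLexLt pvLexLe
  constructor
  · intro h; simp only [Bool.or_eq_false_iff, decide_eq_false_iff_not, Bool.and_eq_false_iff,
      beq_eq_false_iff_ne] at h
    omega
  · intro h; simp only [Bool.or_eq_false_iff, decide_eq_false_iff_not, Bool.and_eq_false_iff,
      beq_eq_false_iff_ne]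
    omega

theorem pvLexLe_refl (a : Int × Int) : pvLexLe a a := by unfold pvLexLe; omega

theorem pvLexLe_trans {a b c : Int × Int} (h1 : pvLexLe a b) (h2 : pvLexLe b c) : pvLexLe a c := by
  unfold pvLexLe at *; omega

theorem pvLexLe_total (a b : Int × Int) : pvLexLe a b ∨ pvLexLe b a := by unfold pvLexLe; omega

-- recursive view of B's position-search-and-insert
def pvInsertSorted (x : Int × Int) : List (Int × Int) → List (Int × Int)
  | [] => [x]
  | y :: ys => if pvLexLt y x then y :: pvInsertSorted x ys else x :: y :: ys

theorem pvFindPos_shift (x : Int × Int) : ∀ (l : List (Int × Int)) (k : Nat),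
    pvFindPos x l (k + 1) = pvFindPos x l k + 1 := by
  intro l
  induction l with
  | nil => intro k; rfl
  | cons y ys ih =>
    intro k
    simp only [pvFindPos]
    split
    · exact ih (k + 1)
    · rfl

theorem pvFindPos_le (x : Int × Int) : ∀ (l : List (Int × Int)), pvFindPos x l 0 ≤ l.length := by
  intro l
  induction l with
  | nil => simp [pvFindPos]
  | cons y ys ih =>
    simp only [pvFindPos, List.length_cons]
    split
    · rw [pvFindPos_shift]; omega
    · omega

theorem pvTake_drop_findPos (x : Int × Int) : ∀ (l : List (Int × Int)),
    l.take (pvFindPos x l 0) ++ x :: l.drop (pvFindPos x l 0) = pvInsertSorted x l := by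
  intro l
  induction l with
  | nil => simp [pvFindPos, pvInsertSorted]
  | cons y ys ih =>
    simp only [pvFindPos, pvInsertSorted]
    split
    · rw [pvFindPos_shift, List.take_succ_cons, List.drop_succ_cons, List.cons_append, ih]
    · rfl

theorem pvInsert_eq (x : Int × Int) (l : List (Int × Int)) :
    PySem.List.insert l ((pvFindPos x l 0 : Nat) : Int) x = pvInsertSorted x l := by
  rw [PySem.List.insert_natCast l _ x (pvFindPos_le x l), pvTake_drop_findPos]

theorem mem_pvInsertSorted {x z : Int × Int} : ∀ {l : List (Int × Int)},
    z ∈ pvInsertSorted x l ↔ z = x ∨ z ∈ l := by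
  intro l; induction l with
  | nil => simp [pvInsertSorted]
  | cons y ys ih =>
    simp only [pvInsertSorted]
    split <;> (simp [ih]; try tauto)

theorem perm_pvInsertSorted (x : Int × Int) : ∀ (l : List (Int × Int)),
    (pvInsertSorted x l).Perm (x :: l) := by
  intro l; induction l with
  | nil => simp [pvInsertSorted]
  | cons y ys ih =>
    simp only [pvInsertSorted]
    split
    · exact (ih.cons y).trans (List.Perm.swap x y ys)
    · exact List.Perm.refl _

theorem pairwise_pvInsertSorted {x : Int × Int} : ∀ {l : List (Int × Int)},
    l.Pairwise pvLexLe → (pvInsertSorted x l).Pairwise pvLexLe := by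
  intro l; induction l with
  | nil => simp [pvInsertSorted, pvLexLe]
  | cons y ys ih =>
    intro hp
    rw [List.pairwise_cons] at hp
    obtain ⟨hy, hys⟩ := hp
    simp only [pvInsertSorted]
    split
    · rename_i hlt
      rw [List.pairwise_cons]
      refine ⟨?_, ih hys⟩
      intro z hz
      rcases mem_pvInsertSorted.mp hz with rfl | hz
      · -- pvLexLt y x = true → pvLexLe y x
        rcases pvLexLe_total y z with h | h
        · exact h
        · have := (pvLexLt_false_iff y z).mpr h
          rw [this] at hlt; cases hlt
      · exact hy z hz
    · rename_i hnlt
      have hxy : pvLexLe x y := (pvLexLt_false_iff y x).mp (by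
        cases h : pvLexLt y x with
        | false => rfl
        | true => exact absurd h hnlt)
      rw [List.pairwise_cons]
      refine ⟨?_, List.pairwise_cons.mpr ⟨hy, hys⟩⟩
      intro z hz
      rcases List.mem_cons.mp hz with rfl | hz
      · exact hxy
      · exact pvLexLe_trans hxy (hy z hz)

theorem mem_pvPool {wl : List Int} {a i : Int} :
    (a, i) ∈ pvPool wl ↔ ∃ (k : Nat) (h : k < wl.length), a = wl[k] ∧ i = (k : Int) := by
  unfold pvPool
  simp only [List.mem_map, PySem.List.mem_enumerate_iff]
  constructor
  · rintro ⟨p, ⟨k, hk, rfl⟩, h⟩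
    simp at h
    exact ⟨k, hk, h.1.symm, by omega⟩
  · rintro ⟨k, hk, rfl, rfl⟩
    exact ⟨((k : Int), wl[k]), ⟨k, hk, by simp⟩, by simp⟩

theorem length_pvPool (wl : List Int) : (pvPool wl).length = wl.length := by
  simp [pvPool, PySem.List.length_enumerate]

theorem pvPool_split (t : List Int) (a : Int) (dseg : List Int) :
    pvPool (t ++ a :: dseg) = pvPool t ++ ((a, (t.length : Int)) ::
      (PySem.List.enumerate dseg ((t.length : Int) + 1)).map (fun p => (p.2, p.1))) := by
  unfold pvPool
  rw [PySem.List.enumerate_append, List.map_append]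
  congr 1
  rw [PySem.List.enumerate_cons]
  simp

theorem pvPool_take_drop (wl : List Int) (k : Nat) (hk : k < wl.length) :
    pvPool wl = pvPool (wl.take k) ++ ((wl[k], (k : Int)) ::
      (PySem.List.enumerate (wl.drop (k + 1)) ((k : Int) + 1)).map (fun p => (p.2, p.1))) := by
  have hlen : (wl.take k).length = k := by simp [Nat.le_of_lt hk]
  conv_lhs => rw [show wl = wl.take k ++ wl[k] :: wl.drop (k + 1) by
    conv_lhs => rw [← List.take_append_drop k wl]
    congr 1
    exact (List.getElem_cons_drop hk).symm]
  rw [pvPool_split, hlen]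

theorem pvPool_set (wl : List Int) (k : Nat) (hk : k < wl.length) (v : Int) :
    pvPool (wl.set k v) = pvPool (wl.take k) ++ ((v, (k : Int)) ::
      (PySem.List.enumerate (wl.drop (k + 1)) ((k : Int) + 1)).map (fun p => (p.2, p.1))) := by
  have hlen : (wl.take k).length = k := by simp [Nat.le_of_lt hk]
  rw [List.set_eq_take_append_cons_drop, if_pos hk, pvPool_split, hlen]

-- helper: first index characterisation for index?
theorem pvIndex?_eq (wl : List Int) (m : Int) (k : Nat) (hk : k < wl.length)
    (h1 : wl[k] = m) (h2 : ∀ t, t < k → ∀ (ht : t < wl.length), wl[t] ≠ m) :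
    PySem.List.index? wl m = some k := by
  rw [PySem.List.index?_eq_some_iff]
  refine ⟨wl.take k, wl.drop (k + 1), ?_, by simp [List.length_take, Nat.le_of_lt hk], ?_⟩
  · rw [← h1]
    conv_lhs => rw [← List.take_append_drop k wl]
    congr 1
    exact (List.getElem_cons_drop hk).symm
  · intro hm
    obtain ⟨t, ht, hval⟩ := List.mem_take_iff_getElem.mp hm
    exact h2 t (by omega) (by omega) (by simpa using hval)

-- the core simulation: one greedy step
theorem pvStep_sim (wl : List Int) (ws rest : List (Int × Int)) (m j : Int)
    (d : PySem.Dict Int Int) (p : Int × Int)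
    (hws : ws = (m, j) :: rest)
    (hperm : ws.Perm (pvPool wl))
    (hsorted : ws.Pairwise pvLexLe) :
    (pvStepA (wl, d) p).2 = (pvStepB (ws, d) p).2 ∧
    (pvStepA (wl, d) p).1.length = wl.length ∧
    (pvStepB (ws, d) p).1.Perm (pvPool (pvStepA (wl, d) p).1) ∧
    (pvStepB (ws, d) p).1.Pairwise pvLexLe := by
  subst hws
  -- the head is in the pool
  have hmem : (m, j) ∈ pvPool wl := hperm.mem_iff.mp (List.mem_cons_self)
  obtain ⟨k, hk, hm, hj⟩ := mem_pvPool.mp hmem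
  subst hj
  have hhead : ∀ y ∈ pvPool wl, pvLexLe (m, (k : Int)) y := by
    intro y hy
    rcases List.mem_cons.mp (hperm.mem_iff.mpr hy) with rfl | hy'
    · exact pvLexLe_refl _
    · exact (List.pairwise_cons.mp hsorted).1 y hy'
  -- m is the minimum of wl
  have hmin : ∀ a ∈ wl, m ≤ a := by
    intro a ha
    obtain ⟨t, ht, hta⟩ := List.mem_iff_getElem.mp ha
    have := hhead (a, (t : Int)) (mem_pvPool.mpr ⟨t, ht, hta.symm, rfl⟩)
    simp [pvLexLe] at this; omega
  have hmmem : m ∈ wl := hm ▸ List.getElem_mem hk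
  have hwlne : wl ≠ [] := by rintro rfl; simp at hk
  -- A's min? computes m
  have hmin? : PySem.List.min? wl (fun x => x) = some m := by
    cases hmo : PySem.List.min? wl (fun x => x) with
    | none => exact absurd ((PySem.List.min?_eq_none_iff wl (fun x => x)).mp hmo) hwlne
    | some m' =>
      have hm'mem := PySem.List.min?_mem hmo
      have hm'min := PySem.List.min?_isMin hmo
      have h1 : m' ≤ m := hm'min m hmmem
      have h2 : m ≤ m' := hmin m' hm'mem
      rw [le_antisymm h1 h2]
  -- A's index? computes k
  have hfirst : ∀ t, t < k → ∀ (ht : t < wl.length), wl[t] ≠ m := by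
    intro t htk ht he
    have := hhead (m, (t : Int)) (mem_pvPool.mpr ⟨t, ht, he.symm, rfl⟩)
    simp [pvLexLe] at this; omega
  have hidx : PySem.List.index? wl m = some k := pvIndex?_eq wl m k hk hm.symm hfirst
  have hgetD : wl.getD k 0 = m := by rw [List.getD_eq_getElem _ _ hk, hm]
  -- unfold both steps
  have hstepA : pvStepA (wl, d) p = (wl.set k (m + p.2), d.insert p.1 (k : Int)) := by
    unfold pvStepA
    simp only [hmin?, Option.getD_some, hidx]
    rw [hgetD]
  have hstepB : pvStepB ((m, (k : Int)) :: rest, d) p = (pvInsertSorted (m + p.2, (k : Int)) rest, d.insert p.1 ((k : Int))) := by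
    unfold pvStepB
    simp only [pvInsert_eq]
  rw [hstepA, hstepB]
  refine ⟨rfl, by simp, ?_, pairwise_pvInsertSorted (List.pairwise_cons.mp hsorted).2⟩
  -- permutation of the new pool
  have hdecomp := pvPool_take_drop wl k hk
  have hrest : rest.Perm (pvPool (wl.take k) ++
      (PySem.List.enumerate (wl.drop (k + 1)) ((k : Int) + 1)).map (fun p => (p.2, p.1))) := by
    have h1 : ((wl[k], (k : Int)) :: rest).Perm (pvPool wl) := by rw [← hm]; exact hperm
    rw [hdecomp] at h1
    exact (h1.trans List.perm_middle).cons_inv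
  rw [pvPool_set wl k hk]
  exact (perm_pvInsertSorted _ _).trans ((hrest.cons _).trans List.perm_middle.symm)

-- the whole loop: equal dicts from any invariant-linked pair of states
theorem pvLoop (parts : List (Int × Int)) : ∀ (wl : List Int) (ws : List (Int × Int))
    (d : PySem.Dict Int Int), wl ≠ [] → ws.Perm (pvPool wl) → ws.Pairwise pvLexLe →
    (parts.foldl pvStepA (wl, d)).2 = (parts.foldl pvStepB (ws, d)).2 := by
  induction parts with
  | nil => intro wl ws d _ _ _; rfl
  | cons p parts ih =>
    intro wl ws d hne hperm hsorted
    have hwsne : ws ≠ [] := by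
      rintro rfl
      have := hperm.length_eq
      rw [length_pvPool] at this
      exact hne (List.eq_nil_of_length_eq_zero this.symm)
    obtain ⟨⟨m, j⟩, rest, rfl⟩ : ∃ h t, ws = h :: t := by
      cases ws with
      | nil => exact absurd rfl hwsne
      | cons h t => exact ⟨h, t, rfl⟩
    obtain ⟨hd, hlen, hperm', hsorted'⟩ := pvStep_sim wl _ rest m j d p rfl hperm hsorted
    simp only [List.foldl_cons]
    have hne' : (pvStepA (wl, d) p).1 ≠ [] := by
      intro h
      rw [h] at hlen
      exact hne (List.eq_nil_of_length_eq_zero hlen.symm)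
    have : parts.foldl pvStepA (pvStepA (wl, d) p) =
        parts.foldl pvStepA ((pvStepA (wl, d) p).1, (pvStepA (wl, d) p).2) := by rfl
    rw [this, hd]
    exact ih _ _ _ hne' hperm' hsorted'

-- initial pool of w zero-loaded workers
theorem pvPool_replicate : ∀ (n : Nat) (s : Int),
    (PySem.List.enumerate (List.replicate n (0 : Int)) s).map (fun p => (p.2, p.1)) =
      (List.range n).map (fun (i : Nat) => ((0 : Int), s + (i : Int))) := by
  intro n
  induction n with
  | zero => intro s; simp [PySem.List.enumerate_nil]
  | succ n ih =>
    intro s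
    rw [List.replicate_succ, PySem.List.enumerate_cons, List.range_succ_eq_map]
    simp only [List.map_cons, List.map_map, ih]
    congr 1
    · simp
    · apply List.map_congr_left
      intro i _
      simp only [Function.comp_apply, Prod.mk.injEq, true_and]
      omega

theorem pvInit_perm (n : Nat) :
    ((List.range n).map (fun (i : Nat) => ((0 : Int), (i : Int)))).Perm
      (pvPool (List.replicate n (0 : Int))) := by
  unfold pvPool
  rw [pvPool_replicate n 0]
  simp

theorem pvInit_sorted (n : Nat) :
    ((List.range n).map (fun (i : Nat) => ((0 : Int), (i : Int)))).Pairwise pvLexLe := by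
  refine List.Pairwise.map _ ?_ List.pairwise_lt_range
  intro a b hab
  simp [pvLexLe]
  omega

-- ===== VERDICT (by name: the statement is the Claim_ definition above) =====
theorem distribute_partitions_spec : Claim_equal_distribute_partitions := by
  intro loads w _ hpre
  unfold Spec_distribute_partitions distribute_partitions distribute_partitions_alt
  rcases hpre with rfl | hw
  · -- empty loads: the parts list is empty, both folds return the initial dict
    simp [PySem.List.sorted]
  · have hn : w.toNat ≠ 0 := by omega
    have hne : List.replicate w.toNat (0 : Int) ≠ [] := by
      simp [List.replicate_eq_nil_iff, hn]
    have := pvLoop (PySem.List.sorted ((PySem.List.pyRange 0 (PySem.List.len loads) 1).map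
        (fun i => (i, PySem.List.pyGetD loads i 0))) (fun x => x.2) true)
      (List.replicate w.toNat 0) ((List.range w.toNat).map (fun (i : Nat) => ((0 : Int), (i : Int))))
      PySem.Dict.empty hne (pvInit_perm w.toNat) (pvInit_sorted w.toNat)
    simp only [this]
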